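-- pv_equiv track=rewrite | github.com/miliar/Code_Jam_Webscraper | solutions_python/Problem_180/1219.py | complify
-- ===== SOURCE A (Python) =====
-- def complify(seq, levels):
-- 	complified = seq
-- 	for _ in range(levels-1):
-- 		temp = []
-- 		for char in complified[:len(seq)]:
-- 			if char == 'L':
-- 				temp += seq
-- 			else:
-- 				temp += ['G' for _ in seq]
-- 		complified = temp
-- 	return complified
-- ===== SOURCE B (Python) =====
-- def complify(seq, levels):
--     # Fixed-point shortcut: after one expansion the sequence stabilizes
--     # (if seq[0]=='L') or collapses to all 'G' (otherwise), so at most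
--     # one expansion pass is ever needed regardless of levels.
--     n = len(seq)
--     if levels <= 1:
--         return seq
--     if n == 0:
--         return []
--     if levels >= 3 and seq[0] != 'L':
--         return ['G'] * (n * n)
--     out = []
--     for ch in seq:
--         out.extend(seq if ch == 'L' else ['G'] * n)
--     return out
-- ===== Notes on version B (the rewrite author's own statement) =====
-- stated objective: faster
-- what changed: B replaces A's levels-1 expansion passes with a closed-form fixed-point analysis: the iteration stabilizes after one pass when seq[0]=='L' and collapses to all-'G' otherwise, so B does at most one expansion pass.
import Mathlib
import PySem

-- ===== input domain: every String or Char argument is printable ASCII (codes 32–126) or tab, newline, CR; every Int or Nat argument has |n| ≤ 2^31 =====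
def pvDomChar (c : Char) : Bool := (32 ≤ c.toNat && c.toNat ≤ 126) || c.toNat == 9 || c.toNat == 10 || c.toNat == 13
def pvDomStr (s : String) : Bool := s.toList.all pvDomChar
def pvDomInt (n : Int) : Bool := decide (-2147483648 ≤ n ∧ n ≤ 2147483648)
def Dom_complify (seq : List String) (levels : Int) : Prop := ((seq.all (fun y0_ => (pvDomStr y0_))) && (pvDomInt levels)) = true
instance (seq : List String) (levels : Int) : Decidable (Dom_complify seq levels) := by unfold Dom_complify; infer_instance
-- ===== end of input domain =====

-- B replaces A's (levels-1)-pass loop by a fixed-point analysis: at most one expansion pass is needed.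

-- ===== PORT A =====
-- one body of A's outer loop: temp = []; for char in complified[:len(seq)]: temp += …
def complifyStep (seq : List String) (complified : List String) : List String :=
  (complified.take seq.length).foldl
    (fun temp char => temp ++ (if char = "L" then seq else seq.map (fun _ => "G"))) []

-- the outer 'for _ in range(levels-1)' loop
def complifyLoop (seq : List String) : Nat → List String → List String
  | 0, c => c
  | k+1, c => complifyLoop seq k (complifyStep seq c)

def complify (seq : List String) (levels : Int) : List String :=
  complifyLoop seq (levels - 1).toNat seq

-- ===== PORT B =====
def complify_alt (seq : List String) (levels : Int) : List String :=
  let n := seq.length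
  if levels ≤ 1 then seq
  else if n = 0 then []
  else if 3 ≤ levels ∧ seq.head? ≠ some "L" then List.replicate (n * n) "G"
  else seq.foldl (fun out ch => out ++ (if ch = "L" then seq else List.replicate n "G")) []

-- ===== PRECONDITION & SPEC =====
def Spec_complify (seq : List String) (levels : Int) (out : List String) : Prop := out = complify_alt seq levels
instance (seq : List String) (levels : Int) (out : List String) : Decidable (Spec_complify seq levels out) := by unfold Spec_complify; infer_instance

-- ===== CLAIM (what is proved, stated in full; the proofs are below) =====
def Claim_equal_complify : Prop := ∀ (seq : List String) (levels : Int), Dom_complify seq levels → Spec_complify seq levels (complify seq levels)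

-- ===== LEMMAS AND PROOFS =====

theorem step_eq_flatMap (seq c : List String) :
    complifyStep seq c
      = (c.take seq.length).flatMap
          (fun ch => if ch = "L" then seq else seq.map (fun _ => "G")) := by
  unfold complifyStep
  rw [PySem.List.foldl_append_eq_flatMap, List.nil_append]

theorem step_congr (seq c c' : List String)
    (h : c.take seq.length = c'.take seq.length) :
    complifyStep seq c = complifyStep seq c' := by
  simp [complifyStep, h]

theorem loop_fix (seq c : List String) (h : complifyStep seq c = c) :
    ∀ m, complifyLoop seq m c = c := by
  intro m
  induction m with
  | zero => rfl
  | succ k ih => simp [complifyLoop, h, ih]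

theorem flatMap_replicate_G (seq : List String) (k : ℕ) :
    (List.replicate k "G").flatMap
        (fun ch => if ch = "L" then seq else seq.map (fun _ => "G"))
      = List.replicate (k * seq.length) "G" := by
  induction k with
  | zero => simp
  | succ j ih =>
      rw [List.replicate_succ, List.flatMap_cons,
        if_neg (by decide : ¬("G" : String) = "L"), ih, List.map_const',
        List.replicate_append_replicate]
      congr 1
      ring

-- first expansion of seq
theorem step_self (seq : List String) :
    complifyStep seq seq
      = seq.flatMap (fun ch => if ch = "L" then seq else seq.map (fun _ => "G")) := by
  rw [step_eq_flatMap, List.take_length]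

theorem take_step_self_L (a : String) (tl : List String) (hL : a = "L") :
    ((complifyStep (a :: tl) (a :: tl)).take (a :: tl).length) = a :: tl := by
  rw [step_self]
  subst hL
  simp only [List.flatMap_cons, reduceIte]
  exact List.take_left

theorem take_step_self_G (a : String) (tl : List String) (hL : a ≠ "L") :
    ((complifyStep (a :: tl) (a :: tl)).take (a :: tl).length)
      = List.replicate (a :: tl).length "G" := by
  rw [step_self]
  simp only [List.flatMap_cons, if_neg hL]
  rw [List.map_const']
  have : (List.replicate (a :: tl).length "G").length = (a :: tl).length := by simp
  calc (List.replicate (a :: tl).length "G" ++ _).take (a :: tl).length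
      = (List.replicate (a :: tl).length "G" ++ _).take
          (List.replicate (a :: tl).length "G").length := by rw [this]
    _ = _ := List.take_left ..

-- B's fold equals A's first expansion
theorem altFold_eq_step (seq : List String) :
    seq.foldl (fun out ch => out ++ (if ch = "L" then seq
        else List.replicate seq.length "G")) []
      = complifyStep seq seq := by
  rw [step_self]
  have := PySem.List.foldl_append_eq_flatMap
    (l := seq)
    (g := fun ch => if ch = "L" then seq else List.replicate seq.length "G") (acc := [])
  simp only [List.nil_append] at this
  rw [this]
  congr 1
  funext ch
  rw [List.map_const']

-- ===== VERDICT (by name: the statement is the Claim_ definition above) =====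
theorem complify_spec : Claim_equal_complify := by
  intro seq levels _
  show complify seq levels = complify_alt seq levels
  unfold complify complify_alt
  by_cases h1 : levels ≤ 1
  · have : (levels - 1).toNat = 0 := by omega
    simp [this, complifyLoop, h1]
  · -- levels ≥ 2: at least one pass
    have h2 : 2 ≤ levels := by omega
    obtain ⟨k, hk⟩ : ∃ k, (levels - 1).toNat = k + 1 := ⟨(levels - 2).toNat, by omega⟩
    rw [hk, if_neg h1]
    cases seq with
    | nil =>
        have hfix : complifyStep [] [] = [] := by simp [complifyStep]
        simp [complifyLoop, hfix, loop_fix]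
    | cons a tl =>
        set seq := a :: tl with hseq
        have hn : seq.length ≠ 0 := by simp [hseq]
        rw [if_neg hn]
        by_cases hL : a = "L"
        · -- seq itself is a fixed point after one step
          have hfix : complifyStep seq (complifyStep seq seq) = complifyStep seq seq := by
            apply step_congr
            rw [take_step_self_L a tl hL, List.take_length]
          have hB : ¬ (3 ≤ levels ∧ seq.head? ≠ some "L") := by
            simp [hseq, hL]
          rw [if_neg hB, altFold_eq_step]
          simp [complifyLoop]
          exact loop_fix seq _ hfix k
        · -- first char not 'L'
          by_cases h3 : 3 ≤ levels
          · -- at least two passes: collapses to all 'G'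
            obtain ⟨j, hj⟩ : ∃ j, k = j + 1 := ⟨(levels - 3).toNat, by omega⟩
            have hT2 : complifyStep seq (complifyStep seq seq)
                = List.replicate (seq.length * seq.length) "G" := by
              rw [step_eq_flatMap, take_step_self_G a tl hL, flatMap_replicate_G]
            have htake : (List.replicate (seq.length * seq.length) "G").take seq.length
                = List.replicate seq.length "G" := by
              rw [List.take_replicate]
              congr 1
              have : 1 ≤ seq.length := by simp [hseq]
              exact Nat.min_eq_left (Nat.le_mul_of_pos_left _ (by omega))
            have hfix : complifyStep seq (List.replicate (seq.length * seq.length) "G")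
                = List.replicate (seq.length * seq.length) "G" := by
              rw [step_eq_flatMap, htake, flatMap_replicate_G]
            have hB : (3 ≤ levels ∧ seq.head? ≠ some "L") := by
              refine ⟨h3, ?_⟩; simp [hseq, hL]
            rw [if_pos hB, hj]
            simp only [complifyLoop]
            rw [hT2]
            exact loop_fix seq _ hfix j
          · -- exactly one pass (levels = 2)
            have hk1 : k = 0 := by omega
            have hB : ¬ (3 ≤ levels ∧ seq.head? ≠ some "L") := by
              intro ⟨h, _⟩; exact h3 h
            rw [if_neg hB, altFold_eq_step, hk1]
            simp [complifyLoop]
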